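-- pv_equiv track=rewrite | github.com/tbuiG/Chess-Engine-Project | Evaluate/evaluationjb.py | countIsoPawns
-- ===== SOURCE A (Python) =====
-- def countIsoPawns(pawns):
--     returnResult = 0
--
--     differenceRange = [-9, -8, -7, -1, 1, 7, 8, 9]
--
--     for pawn in pawns:
--         for dif in differenceRange:
--             if pawn + dif >= 0 and pawn + dif < 64 and pawn + dif in pawns:
--                 returnResult = returnResult + 1
--                 break
--
--     return returnResult
-- ===== SOURCE B (Python) =====
-- def countIsoPawns(pawns):
--     occupied = set(pawns)
--     # scatter: for each in-bounds occupied square q, mark every square that has q as a neighbor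
--     has_neighbor = set()
--     for q in occupied:
--         if 0 <= q < 64:
--             for dif in (-9, -8, -7, -1, 1, 7, 8, 9):
--                 has_neighbor.add(q - dif)
--     return sum(1 for p in pawns if p in has_neighbor)
-- ===== Notes on version B (the rewrite author's own statement) =====
-- stated objective: faster
-- what changed: Replaced the per-pawn gather scan (membership test 'pawn+dif in pawns' rescans the whole list for every pawn and offset) by a hashed scatter: build set(pawns) once, scatter each in-bounds occupied square into a 'has_neighbor' set, then one counting pass over the list.
import Mathlib
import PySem

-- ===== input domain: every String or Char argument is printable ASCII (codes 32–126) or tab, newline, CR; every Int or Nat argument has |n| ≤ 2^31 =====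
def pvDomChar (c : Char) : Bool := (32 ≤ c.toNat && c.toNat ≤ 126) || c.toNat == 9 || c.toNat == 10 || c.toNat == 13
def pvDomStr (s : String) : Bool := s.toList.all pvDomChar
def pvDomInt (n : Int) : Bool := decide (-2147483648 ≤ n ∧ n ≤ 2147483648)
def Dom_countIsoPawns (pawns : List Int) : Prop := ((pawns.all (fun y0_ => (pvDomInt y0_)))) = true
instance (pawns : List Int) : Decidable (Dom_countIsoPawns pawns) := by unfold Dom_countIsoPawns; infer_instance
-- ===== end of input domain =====

-- B replaces A's quadratic gather scan (list membership per pawn and offset, with break)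
-- by a one-time set of the pawns scattered into a neighbor-index set, then one counting pass.

-- ===== PORT A =====
def pvDiffRange : List Int := [-9, -8, -7, -1, 1, 7, 8, 9]

-- inner 'for dif in differenceRange: … break' loop of A
def pvInnerA (pawns : List Int) (pawn : Int) : List Int → Int → Int
  | [], acc => acc
  | dif :: rest, acc =>
    if pawn + dif ≥ 0 ∧ pawn + dif < 64 ∧ (pawn + dif) ∈ pawns then acc + 1
    else pvInnerA pawns pawn rest acc

def countIsoPawns (pawns : List Int) : Int :=
  pawns.foldl (fun acc pawn => pvInnerA pawns pawn pvDiffRange acc) 0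

-- ===== PORT B =====
-- mark every square having in-bounds occupied square q as a neighbor
def pvScatter (C : PySem.Set Int) (q : Int) : PySem.Set Int :=
  pvDiffRange.foldl (fun C dif => PySem.Set.add C (q - dif)) C

def pvHasNeighbor (occupied : PySem.Set Int) : PySem.Set Int :=
  occupied.foldl (fun C q => if 0 ≤ q ∧ q < 64 then pvScatter C q else C) PySem.Set.empty

def countIsoPawns_alt (pawns : List Int) : Int :=
  let hasNeighbor := pvHasNeighbor (PySem.Set.ofList pawns)
  pawns.foldl (fun acc p => if p ∈ hasNeighbor then acc + 1 else acc) 0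

-- ===== PRECONDITION & SPEC =====
def Spec_countIsoPawns (pawns : List Int) (out : Int) : Prop := out = countIsoPawns_alt pawns
instance (pawns : List Int) (out : Int) : Decidable (Spec_countIsoPawns pawns out) := by unfold Spec_countIsoPawns; infer_instance

-- ===== CLAIM (what is proved, stated in full; the proofs are below) =====
def Claim_equal_countIsoPawns : Prop := ∀ (pawns : List Int), Dom_countIsoPawns pawns → Spec_countIsoPawns pawns (countIsoPawns pawns)

-- ===== LEMMAS AND PROOFS =====

-- A's inner break loop adds 1 iff some offset hits an in-bounds occupied square
lemma pvInnerA_eq (pawns : List Int) (pawn : Int) (ds : List Int) (acc : Int) :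
    pvInnerA pawns pawn ds acc =
      acc + (if ∃ d ∈ ds, 0 ≤ pawn + d ∧ pawn + d < 64 ∧ (pawn + d) ∈ pawns then 1 else 0) := by
  induction ds generalizing acc with
  | nil => simp [pvInnerA]
  | cons d rest ih =>
    simp only [pvInnerA]
    by_cases h : pawn + d ≥ 0 ∧ pawn + d < 64 ∧ (pawn + d) ∈ pawns
    · rw [if_pos h, if_pos ⟨d, by simp, h.1, h.2.1, h.2.2⟩]
    · rw [if_neg h, ih]
      by_cases h2 : ∃ x ∈ rest, 0 ≤ pawn + x ∧ pawn + x < 64 ∧ pawn + x ∈ pawns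
      · rcases h2 with ⟨x, hx, hc⟩
        rw [if_pos ⟨x, hx, hc⟩, if_pos ⟨x, by simp [hx], hc⟩]
      · rw [if_neg h2, if_neg]
        rintro ⟨x, hx, h0, h64, hm⟩
        rcases List.mem_cons.mp hx with rfl | hx
        · exact h ⟨h0, h64, hm⟩
        · exact h2 ⟨x, hx, h0, h64, hm⟩

lemma mem_pvScatter (C : PySem.Set Int) (q p : Int) :
    p ∈ pvScatter C q ↔ p ∈ C ∨ ∃ d ∈ pvDiffRange, p = q - d := by
  unfold pvScatter
  simp only [pvDiffRange, List.foldl, PySem.Set.mem_add, List.mem_cons, List.not_mem_nil]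
  constructor
  · rintro h
    rcases h with ((((((((h|h)|h)|h)|h)|h)|h)|h)|h) <;>
      first
        | exact Or.inl h
        | exact Or.inr ⟨_, by simp, h⟩
  · rintro (h | ⟨d, hd, rfl⟩)
    · tauto
    · rcases hd with rfl|rfl|rfl|rfl|rfl|rfl|rfl|rfl|h
      · tauto
      · tauto
      · tauto
      · tauto
      · tauto
      · tauto
      · tauto
      · tauto
      · simp at h

lemma mem_foldl_scatter (l : List Int) (C : PySem.Set Int) (p : Int) :
    p ∈ l.foldl (fun C q => if 0 ≤ q ∧ q < 64 then pvScatter C q else C) C ↔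
      p ∈ C ∨ ∃ q ∈ l, (0 ≤ q ∧ q < 64) ∧ ∃ d ∈ pvDiffRange, p = q - d := by
  induction l generalizing C with
  | nil => simp
  | cons q rest ih =>
    simp only [List.foldl, ih]
    by_cases hq : 0 ≤ q ∧ q < 64
    · rw [if_pos hq, mem_pvScatter]
      constructor
      · rintro ((h | h) | h)
        · exact Or.inl h
        · exact Or.inr ⟨q, by simp, hq, h⟩
        · rcases h with ⟨r, hr, hr2⟩; exact Or.inr ⟨r, by simp [hr], hr2⟩
      · rintro (h | ⟨r, hr, hr2⟩)
        · exact Or.inl (Or.inl h)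
        · rcases List.mem_cons.mp hr with rfl | hr
          · exact Or.inl (Or.inr hr2.2)
          · exact Or.inr ⟨r, hr, hr2⟩
    · rw [if_neg hq]
      constructor
      · rintro (h | ⟨r, hr, hr2⟩)
        · exact Or.inl h
        · exact Or.inr ⟨r, by simp [hr], hr2⟩
      · rintro (h | ⟨r, hr, hr2⟩)
        · exact Or.inl h
        · rcases List.mem_cons.mp hr with rfl | hr
          · exact absurd hr2.1 hq
          · exact Or.inr ⟨r, hr, hr2⟩

-- membership in B's has_neighbor set ↔ A's inner-loop condition
lemma mem_pvHasNeighbor (pawns : List Int) (p : Int) :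
    p ∈ pvHasNeighbor (PySem.Set.ofList pawns) ↔
      ∃ d ∈ pvDiffRange, 0 ≤ p + d ∧ p + d < 64 ∧ (p + d) ∈ pawns := by
  unfold pvHasNeighbor
  rw [mem_foldl_scatter]
  simp only [PySem.Set.empty, List.not_mem_nil, false_or, PySem.Set.mem_ofList]
  constructor
  · rintro ⟨q, hq, ⟨h0, h64⟩, d, hd, rfl⟩
    exact ⟨d, hd, by omega, by omega, by simpa using hq⟩
  · rintro ⟨d, hd, h0, h64, hm⟩
    exact ⟨p + d, hm, ⟨h0, h64⟩, d, hd, by ring⟩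

lemma foldl_eq (pawns : List Int) :
    ∀ (l : List Int) (acc : Int),
      l.foldl (fun acc pawn => pvInnerA pawns pawn pvDiffRange acc) acc =
      l.foldl (fun acc p => if p ∈ pvHasNeighbor (PySem.Set.ofList pawns) then acc + 1 else acc) acc := by
  intro l
  induction l with
  | nil => intro acc; rfl
  | cons p rest ih =>
    intro acc
    simp only [List.foldl]
    rw [pvInnerA_eq, ih]
    congr 1
    by_cases h : p ∈ pvHasNeighbor (PySem.Set.ofList pawns)
    · rw [if_pos h, if_pos ((mem_pvHasNeighbor pawns p).mp h)]
    · rw [if_neg h, if_neg (fun hc => h ((mem_pvHasNeighbor pawns p).mpr hc))]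
      ring

-- ===== VERDICT (by name: the statement is the Claim_ definition above) =====
theorem countIsoPawns_spec : Claim_equal_countIsoPawns := by
  intro pawns _
  unfold Spec_countIsoPawns countIsoPawns countIsoPawns_alt
  exact foldl_eq pawns pawns 0
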